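-- pv_equiv track=rewrite | github.com/MAXIORBOY/HanoiSolver | Main.py | correct_memory_array
-- ===== SOURCE A (Python) =====
-- def correct_memory_array(memory):
--     move_array = []
--     for i in range(len(memory)):
--         to_write = ''
--         for j in range(len(memory[i])):
--             if j < 2:
--                 if j == 1:
--                     to_write += '->'
--
--                 to_write += change_index_to_letter(memory[i][j])
--
--             else:
--                 to_write += ' | '
--                 to_write += str(memory[i][j])
--
--         move_array.append(to_write)
--
--     return move_array
--
-- def change_index_to_letter(index):
--     if index == 0:
--         return 'Start '
--     elif index == 1:
--         return 'Buffer'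
--     else:
--         return 'Target'
-- ===== SOURCE B (Python) =====
-- def change_index_to_letter(index):
--     if index == 0:
--         return 'Start '
--     elif index == 1:
--         return 'Buffer'
--     else:
--         return 'Target'
--
--
-- def _fmt_tail(rest):
--     # recursion on the list structure for the ' | n' part
--     if not rest:
--         return ''
--     return ' | ' + str(rest[0]) + _fmt_tail(rest[1:])
--
--
-- def _fmt_row(row):
--     # pattern-match on the row's shape: 0, 1, or >=2 leading elements
--     if not row:
--         return ''
--     if len(row) == 1:
--         return change_index_to_letter(row[0])
--     return change_index_to_letter(row[0]) + '->' + change_index_to_letter(row[1]) + _fmt_tail(row[2:])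
--
--
-- def correct_memory_array(memory):
--     # structural recursion over the rows instead of an indexed loop
--     if not memory:
--         return []
--     return [_fmt_row(memory[0])] + correct_memory_array(memory[1:])
-- ===== Notes on version B (the rewrite author's own statement) =====
-- stated objective: alternative
-- what changed: Replaces A's indexed nested loops with a per-index branch on j by structural recursion: rows are consumed head-first, and each row is formatted by pattern-matching on its shape (empty / single / two heads plus a recursively formatted tail), with no index arithmetic or accumulator; it trades speed for a loop-free decomposition (the recursive list concatenation is quadratic in the number of rows).
import Mathlib
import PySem

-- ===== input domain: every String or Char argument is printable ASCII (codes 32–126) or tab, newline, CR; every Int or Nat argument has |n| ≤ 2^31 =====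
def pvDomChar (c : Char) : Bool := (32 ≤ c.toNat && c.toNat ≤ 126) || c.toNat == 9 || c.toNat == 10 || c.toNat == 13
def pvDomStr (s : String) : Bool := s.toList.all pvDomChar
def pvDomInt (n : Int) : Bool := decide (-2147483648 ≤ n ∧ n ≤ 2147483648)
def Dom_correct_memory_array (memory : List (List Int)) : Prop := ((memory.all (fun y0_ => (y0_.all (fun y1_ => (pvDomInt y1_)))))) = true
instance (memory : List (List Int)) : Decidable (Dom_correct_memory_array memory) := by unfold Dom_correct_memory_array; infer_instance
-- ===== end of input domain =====

-- B replaces A's indexed nested loops (per-index branch on j) by structural recursion on the rows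
-- and pattern-matching on each row's shape (alternative decomposition, same cost).

-- ===== PORT A =====
-- helper change_index_to_letter, shared by both versions (it is a module helper in the source)
def change_index_to_letter (index : Int) : String :=
  if index = 0 then "Start "
  else if index = 1 then "Buffer"
  else "Target"

-- the body of A's outer loop: build to_write for row memory[i] (inner j-loop, same branches)
def pv_to_write (row : List Int) : String :=
  (PySem.List.pyRange 0 (row.length : Int) 1).foldl
    (fun tw j =>
      if j < 2 then
        (if j = 1 then tw ++ "->" else tw) ++ change_index_to_letter (PySem.List.pyGetD row j 0)
      else
        (tw ++ " | ") ++ PySem.Int.toStr (PySem.List.pyGetD row j 0)) ""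

def correct_memory_array (memory : List (List Int)) : List String :=
  (PySem.List.pyRange 0 (memory.length : Int) 1).foldl
    (fun move_array i => move_array ++ [pv_to_write (PySem.List.pyGetD memory i [])]) []

-- ===== PORT B =====
-- B's _fmt_tail: recursion on the list structure for the ' | n' part
def pv_fmt_tail : List Int → String
  | [] => ""
  | x :: l => " | " ++ PySem.Int.toStr x ++ pv_fmt_tail l

-- B's _fmt_row: pattern-match on the row's shape (empty / single / two heads + tail)
def pv_fmt_row : List Int → String
  | [] => ""
  | [a] => change_index_to_letter a
  | a :: b :: rest =>
      change_index_to_letter a ++ "->" ++ change_index_to_letter b ++ pv_fmt_tail rest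

-- B's correct_memory_array: structural recursion over the rows
def correct_memory_array_alt : List (List Int) → List String
  | [] => []
  | row :: rows => pv_fmt_row row :: correct_memory_array_alt rows

-- ===== PRECONDITION & SPEC =====
def Spec_correct_memory_array (memory : List (List Int)) (out : List String) : Prop := out = correct_memory_array_alt memory
instance (memory : List (List Int)) (out : List String) : Decidable (Spec_correct_memory_array memory out) := by unfold Spec_correct_memory_array; infer_instance

-- ===== CLAIM (what is proved, stated in full; the proofs are below) =====
def Claim_equal_correct_memory_array : Prop := ∀ (memory : List (List Int)), Dom_correct_memory_array memory → Spec_correct_memory_array memory (correct_memory_array memory)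

-- ===== LEMMAS AND PROOFS =====

theorem tail_foldl (rest : List Int) (s : String) :
    rest.foldl (fun tw x => (tw ++ " | ") ++ PySem.Int.toStr x) s
      = s ++ pv_fmt_tail rest := by
  induction rest generalizing s with
  | nil => simp [pv_fmt_tail]
  | cons a l ih =>
      simp only [List.foldl_cons, pv_fmt_tail, ih]
      simp [String.append_assoc]

theorem row_eq (row : List Int) : pv_to_write row = pv_fmt_row row := by
  match row with
  | [] => decide
  | [a] =>
      unfold pv_to_write
      rw [show ((([a] : List Int).length : Int)) = 1 from by simp,
          show PySem.List.pyRange 0 (1:Int) 1 = [0] from by decide]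
      simp only [List.foldl_cons, List.foldl_nil]
      rw [if_pos (by norm_num : (0:Int) < 2), if_neg (by norm_num : ¬(0:Int) = 1)]
      simp [pv_fmt_row, PySem.List.pyGetD_zero_cons]
  | a :: b :: rest =>
      have hlen : ((a :: b :: rest).length : Int) = (rest.length : Int) + 2 := by
        simp; omega
      unfold pv_to_write
      rw [hlen, PySem.List.pyRange_one_append 0 2 ((rest.length : Int) + 2) (by omega) (by omega),
          List.foldl_append,
          show PySem.List.pyRange 0 2 1 = [0, 1] from by decide]
      simp only [List.foldl_cons, List.foldl_nil]
      rw [if_pos (by norm_num : (0:Int) < 2), if_neg (by norm_num : ¬(0:Int) = 1),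
          if_pos (by norm_num : (1:Int) < 2)]
      simp only [if_true]
      rw [PySem.List.foldl_congr_mem _ _
            (fun tw j => (tw ++ " | ") ++ PySem.Int.toStr (PySem.List.pyGetD (a :: b :: rest) j 0)) _
            (by
              intro acc x hx
              have h2 : 2 ≤ x := (PySem.List.mem_pyRange_one.mp hx).1
              have hnot : ¬ x < 2 := by omega
              simp [hnot])]
      rw [show ((rest.length : Int) + 2) = (((a :: b :: rest).length : Int)) from by rw [hlen]]
      rw [PySem.List.foldl_pyRange_pyGetD' (a :: b :: rest) 0
            (fun tw x => (tw ++ " | ") ++ PySem.Int.toStr x) _ (by omega : (0:Int) ≤ 2)]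
      rw [show ((2:Int).toNat) = 2 from rfl]
      rw [show (a :: b :: rest).drop 2 = rest from rfl]
      rw [tail_foldl]
      rw [show PySem.List.pyGetD (a :: b :: rest) 0 0 = a from by
            have h0 : (0:Int) ≤ (rest.length : Int) + 1 := by omega
            simp [PySem.List.pyGetD, PySem.List.pyGet?, PySem.List.pyIdx?, h0],
          show PySem.List.pyGetD (a :: b :: rest) 1 0 = b from by
            simp [PySem.List.pyGetD, PySem.List.pyGet?, PySem.List.pyIdx?]]
      simp [pv_fmt_row, String.append_assoc]

theorem alt_eq_map (memory : List (List Int)) :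
    correct_memory_array_alt memory = memory.map pv_fmt_row := by
  induction memory with
  | nil => rfl
  | cons r rs ih => simp [correct_memory_array_alt, ih]

-- ===== VERDICT (by name: the statement is the Claim_ definition above) =====
theorem correct_memory_array_spec : Claim_equal_correct_memory_array := by
  intro memory _
  unfold Spec_correct_memory_array correct_memory_array
  rw [PySem.List.foldl_pyRange_zero_pyGetD' (f := fun acc row => acc ++ [pv_to_write row]),
      PySem.List.foldl_append_singleton_eq_map, alt_eq_map]
  simp only [List.nil_append]
  exact List.map_congr_left (fun row _ => row_eq row)
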